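-- pv_equiv track=rewrite | github.com/pypi-data/pypi-mirror-330 | packages/sitejuicer/sitejuicer-0.2.1-py3-none-any.whl/sitejuicer/core.py | _strip_metadata_headers
-- ===== SOURCE A (Python) =====
-- def _strip_metadata_headers(content):
--     """
--     Strip metadata headers added by Jina Reader.
--
--     Args:
--         content (str): The content to process.
--
--     Returns:
--         str: The content without metadata headers.
--     """
--     lines = content.split('\n')
--     metadata_section = False
--     result_lines = []
--
--     for line in lines:
--         if line.startswith('---'):
--             if not metadata_section:
--                 metadata_section = True
--             else:
--                 metadata_section = False
--             continue
--
--         if not metadata_section: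
--             result_lines.append(line)
--
--     return '\n'.join(result_lines)
-- ===== SOURCE B (Python) =====
-- def _strip_metadata_headers(content):
--     """Segment-based rewrite: split into segments at '---' lines, keep even-indexed segments."""
--     segments = []
--     current = []
--     for line in content.split('\n'):
--         if line.startswith('---'):
--             segments.append(current)
--             current = []
--         else:
--             current.append(line)
--     segments.append(current)
--     kept = [ln for i, seg in enumerate(segments) if i % 2 == 0 for ln in seg]
--     return '\n'.join(kept)
-- ===== Notes on version B (the rewrite author's own statement) =====
-- stated objective: alternative
-- what changed: Replaced the toggle-flag state machine with a partition of the lines into segments at '---' separators followed by keeping only even-indexed segments.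
import Mathlib
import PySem

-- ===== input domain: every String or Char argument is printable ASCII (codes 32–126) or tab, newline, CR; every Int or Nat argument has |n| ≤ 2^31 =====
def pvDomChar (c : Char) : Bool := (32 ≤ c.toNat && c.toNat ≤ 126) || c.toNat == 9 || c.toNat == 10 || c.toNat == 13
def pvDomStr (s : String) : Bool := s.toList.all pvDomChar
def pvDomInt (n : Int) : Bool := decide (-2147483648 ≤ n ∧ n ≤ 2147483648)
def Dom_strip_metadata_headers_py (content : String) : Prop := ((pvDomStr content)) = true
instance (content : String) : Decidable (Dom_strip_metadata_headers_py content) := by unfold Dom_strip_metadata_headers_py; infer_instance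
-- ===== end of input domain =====

-- B replaces A's toggle-flag line filter by a segment partition at '---' lines plus even-index selection (alternative decomposition, same cost).

-- ===== PORT A =====
-- toggle-flag scan: state = (metadata_section, result_lines); split? with "\n" ≠ "" never returns none, .getD [] is never taken
def strip_metadata_headers_py (content : String) : String :=
  let lines := (PySem.Str.split? content "\n").getD []
  let st := lines.foldl
    (fun (st : Bool × List String) line =>
      if PySem.Str.startswith line "---" then (!st.1, st.2)
      else if !st.1 then (st.1, st.2 ++ [line]) else st)
    (false, [])
  PySem.Str.join "\n" st.2

-- ===== PORT B =====
-- segment partition: state = (completed segments, current segment); then keep even-indexed segments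
def strip_metadata_headers_py_alt (content : String) : String :=
  let lines := (PySem.Str.split? content "\n").getD []
  let st := lines.foldl
    (fun (st : List (List String) × List String) line =>
      if PySem.Str.startswith line "---" then (st.1 ++ [st.2], [])
      else (st.1, st.2 ++ [line]))
    ([], [])
  let segments := st.1 ++ [st.2]
  let kept := ((PySem.List.enumerate segments 0).filter
                  (fun p => PySem.Int.mod p.1 2 == 0)).flatMap (fun p => p.2)
  PySem.Str.join "\n" kept

-- ===== PRECONDITION & SPEC =====
def Spec_strip_metadata_headers_py (content : String) (out : String) : Prop := out = strip_metadata_headers_py_alt content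
instance (content : String) (out : String) : Decidable (Spec_strip_metadata_headers_py content out) := by unfold Spec_strip_metadata_headers_py; infer_instance

-- ===== CLAIM (what is proved, stated in full; the proofs are below) =====
def Claim_equal_strip_metadata_headers_py : Prop := ∀ (content : String), Dom_strip_metadata_headers_py content → Spec_strip_metadata_headers_py content (strip_metadata_headers_py content)

-- ===== LEMMAS AND PROOFS =====

-- reference spec: the kept lines, as a structural recursion with A's flag
def pvKeep (b : Bool) : List String → List String
  | [] => []
  | l :: ls =>
    if PySem.Str.startswith l "---" then pvKeep (!b) ls
    else if b then pvKeep b ls else l :: pvKeep b ls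

-- B's segment list, as a structural recursion
def pvSeg : List String → List (List String)
  | [] => [[]]
  | l :: ls =>
    if PySem.Str.startswith l "---" then [] :: pvSeg ls
    else match pvSeg ls with
      | [] => [[l]]
      | s :: r => (l :: s) :: r

-- B's even-index selection, with an arbitrary start index
def pvSel (s : Int) (segs : List (List String)) : List String :=
  ((PySem.List.enumerate segs s).filter (fun p => PySem.Int.mod p.1 2 == 0)).flatMap (fun p => p.2)

def pvHeadPre (cur : List String) : List (List String) → List (List String)
  | [] => [cur]
  | s :: r => (cur ++ s) :: r

lemma pvSeg_ne_nil (ls : List String) : pvSeg ls ≠ [] := by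
  cases ls with
  | nil => simp [pvSeg]
  | cons l ls =>
    simp only [pvSeg]
    split
    · simp
    · cases h : pvSeg ls <;> simp

lemma pvHeadPre_nil_seg (ls : List String) : pvHeadPre [] (pvSeg ls) = pvSeg ls := by
  cases h : pvSeg ls with
  | nil => exact absurd h (pvSeg_ne_nil ls)
  | cons s r => simp [pvHeadPre]

-- A's fold computes pvKeep
lemma foldA_eq (lines : List String) : ∀ (b : Bool) (acc : List String),
    (lines.foldl
      (fun (st : Bool × List String) line =>
        if PySem.Str.startswith line "---" then (!st.1, st.2)
        else if !st.1 then (st.1, st.2 ++ [line]) else st)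
      (b, acc)).2 = acc ++ pvKeep b lines := by
  induction lines with
  | nil => intro b acc; simp [pvKeep]
  | cons l ls ih =>
    intro b acc
    simp only [List.foldl_cons, pvKeep]
    by_cases h : PySem.Str.startswith l "---" = true
    · rw [if_pos h, if_pos h, ih]
    · rw [if_neg h, if_neg h]
      cases b
      · rw [if_pos (show (!false) = true by decide), if_neg (show ¬ (false = true) by decide), ih]
        simp
      · rw [if_neg (show ¬ ((!true) = true) by decide), if_pos (show true = true from rfl), ih]

-- B's fold computes pvSeg (with the running segment prepended to the head)
lemma foldB_eq (lines : List String) : ∀ (segs : List (List String)) (cur : List String),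
    (lines.foldl
      (fun (st : List (List String) × List String) line =>
        if PySem.Str.startswith line "---" then (st.1 ++ [st.2], [])
        else (st.1, st.2 ++ [line]))
      (segs, cur)).1
    ++ [(lines.foldl
      (fun (st : List (List String) × List String) line =>
        if PySem.Str.startswith line "---" then (st.1 ++ [st.2], [])
        else (st.1, st.2 ++ [line]))
      (segs, cur)).2]
    = segs ++ pvHeadPre cur (pvSeg lines) := by
  induction lines with
  | nil => intro segs cur; simp [pvSeg, pvHeadPre]
  | cons l ls ih =>
    intro segs cur
    simp only [List.foldl_cons, pvSeg]
    by_cases h : PySem.Str.startswith l "---" = true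
    · rw [if_pos h, if_pos h, ih, pvHeadPre_nil_seg]
      simp [pvHeadPre]
    · rw [if_neg h, if_neg h, ih]
      cases hseg : pvSeg ls with
      | nil => exact absurd hseg (pvSeg_ne_nil ls)
      | cons s r => dsimp only; simp [pvHeadPre]

lemma pvSel_nil (s : Int) : pvSel s [] = [] := by
  simp [pvSel, PySem.List.enumerate_nil]

lemma pvSel_cons (s : Int) (x : List String) (xs : List (List String)) :
    pvSel s (x :: xs) =
      (if PySem.Int.mod s 2 == 0 then x else []) ++ pvSel (s + 1) xs := by
  simp only [pvSel, PySem.List.enumerate_cons, List.filter_cons]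
  by_cases h : (PySem.Int.mod s 2 == 0) = true
  · rw [if_pos h, if_pos h]
    simp
  · rw [if_neg h, if_neg h]
    simp

lemma mod_cast_even (k : Nat) : (PySem.Int.mod (k : Int) 2 == 0) = decide (k % 2 = 0) := by
  rw [PySem.Int.mod_eq_emod_of_pos (by norm_num : (0:Int) < 2)]
  by_cases h : k % 2 = 0
  · have h2 : (k : Int) % 2 = 0 := by omega
    rw [h2]
    simp [h]
  · have h1 : k % 2 = 1 := by omega
    have h2 : (k : Int) % 2 = 1 := by omega
    rw [h2, h1]
    rfl

lemma parity_flip (k : Nat) : (!decide (k % 2 = 1)) = decide ((k + 1) % 2 = 1) := by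
  rcases Nat.mod_two_eq_zero_or_one k with h | h <;> simp [h, Nat.add_mod]

-- even-index selection of the segments = pvKeep with the flag set to the start parity
lemma sel_seg (lines : List String) : ∀ (k : Nat),
    pvSel (k : Int) (pvSeg lines) = pvKeep (decide (k % 2 = 1)) lines := by
  induction lines with
  | nil =>
    intro k
    simp only [pvSeg, pvKeep, pvSel_cons, pvSel_nil]
    split <;> simp
  | cons l ls ih =>
    intro k
    simp only [pvSeg, pvKeep]
    by_cases h : PySem.Str.startswith l "---" = true
    · rw [if_pos h, if_pos h, pvSel_cons, mod_cast_even]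
      have h1 : (k : Int) + 1 = ((k + 1 : Nat) : Int) := by push_cast; ring
      rw [h1, ih (k + 1), ← parity_flip]
      split <;> rfl
    · rw [if_neg h, if_neg h]
      cases hseg : pvSeg ls with
      | nil => exact absurd hseg (pvSeg_ne_nil ls)
      | cons s r =>
        dsimp only
        have hrec := ih k
        rw [hseg, pvSel_cons, mod_cast_even] at hrec
        have h1 : (k : Int) + 1 = ((k + 1 : Nat) : Int) := by push_cast; ring
        rw [pvSel_cons, mod_cast_even]
        by_cases hk : k % 2 = 0
        · have hf : decide (k % 2 = 1) = false := by simp; omega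
          rw [if_pos (by simpa using hk)] at hrec
          rw [hf] at hrec ⊢
          rw [if_pos (show decide (k % 2 = 0) = true by simpa using hk), if_neg (show ¬ (false = true) by decide)]
          rw [List.cons_append, hrec]
        · have hf : decide (k % 2 = 1) = true := by simpa using (by omega : k % 2 = 1)
          rw [if_neg (by simpa using hk)] at hrec
          rw [hf] at hrec ⊢
          rw [if_neg (show ¬ (decide (k % 2 = 0) = true) by simpa using hk), if_pos (show true = true from rfl)]
          simpa using hrec

-- B's selection expression on pvSeg, in the exact shape the port produces
lemma sel_seg_zero (lines : List String) :
    ((PySem.List.enumerate (pvSeg lines) 0).filter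
        (fun p => PySem.Int.mod p.1 2 == 0)).flatMap (fun p => p.2)
      = pvKeep false lines := by
  have h := sel_seg lines 0
  simpa [pvSel] using h

-- ===== VERDICT (by name: the statement is the Claim_ definition above) =====
theorem strip_metadata_headers_py_spec : Claim_equal_strip_metadata_headers_py := by
  intro content _
  show strip_metadata_headers_py content = strip_metadata_headers_py_alt content
  unfold strip_metadata_headers_py strip_metadata_headers_py_alt
  simp only [foldA_eq, foldB_eq, List.nil_append, pvHeadPre_nil_seg, sel_seg_zero]
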